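-- pv_equiv track=rewrite | github.com/0HOON/Algorithm_Study | 프로그래머스/unrated/135808. 과일 장수/과일 장수.py | solution
-- ===== SOURCE A (Python) =====
-- def solution(k, m, score):
--     answer = 0
--     box = 0
--     for s in sorted(score, reverse=True):
--         box += 1
--         if box == m:
--             answer += s * m
--             box = 0
--     return answer
-- ===== SOURCE B (Python) =====
-- def solution(k, m, score):
--     # Ascending sort, then pick one minimum per full box by index arithmetic:
--     # the boxes' minima sit at positions n%m, n%m+m, ..., n-m of the ascending order.
--     if m <= 0:
--         return 0
--     a = sorted(score)
--     n = len(a)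
--     return m * sum(a[i] for i in range(n % m, n, m))
-- ===== Notes on version B (the rewrite author's own statement) =====
-- stated objective: alternative
-- what changed: Replaces the descending-sort loop with a box counter by an ascending sort plus closed-form index selection: the minima of the full boxes sit at positions n%m, n%m+m, ..., n-m, so B sums exactly those positions and multiplies by m once.
import Mathlib
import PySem

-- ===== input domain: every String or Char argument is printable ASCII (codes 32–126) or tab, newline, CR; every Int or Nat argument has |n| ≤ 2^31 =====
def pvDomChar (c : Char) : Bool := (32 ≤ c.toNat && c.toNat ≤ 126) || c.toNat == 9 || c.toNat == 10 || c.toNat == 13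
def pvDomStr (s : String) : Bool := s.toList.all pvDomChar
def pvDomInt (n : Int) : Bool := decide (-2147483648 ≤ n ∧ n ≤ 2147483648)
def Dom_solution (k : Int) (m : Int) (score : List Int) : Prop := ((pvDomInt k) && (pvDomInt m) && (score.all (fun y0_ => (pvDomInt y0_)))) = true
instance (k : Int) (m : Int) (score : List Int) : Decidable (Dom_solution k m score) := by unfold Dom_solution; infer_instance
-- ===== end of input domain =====

-- B replaces A's descending-sort loop with a box counter by an ascending sort plus
-- closed-form index selection of each full box's minimum (same O(n log n) cost; alternative decomposition).


-- ===== PORT A =====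
-- answer = 0; box = 0; for s in sorted(score, reverse=True): box += 1; if box == m: answer += s*m; box = 0
def solution (k : Int) (m : Int) (score : List Int) : Int :=
  ((PySem.List.sorted score (fun x => x) true).foldl
    (fun (st : Int × Int) s =>
      let box := st.2 + 1
      if box = m then (st.1 + s * m, 0) else (st.1, box))
    (0, 0)).1

-- ===== PORT B =====
-- if m <= 0: return 0; a = sorted(score); n = len(a); return m * sum(a[i] for i in range(n % m, n, m))
def solution_alt (k : Int) (m : Int) (score : List Int) : Int :=
  if m ≤ 0 then 0
  else
    let a := PySem.List.sorted score (fun x => x) false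
    let n : Int := PySem.List.len a
    m * ((PySem.List.pyRange (PySem.Int.mod n m) n m).foldl
          (fun acc i => acc + PySem.List.pyGetD a i 0) 0)

-- ===== PRECONDITION & SPEC =====
def Spec_solution (k : Int) (m : Int) (score : List Int) (out : Int) : Prop := out = solution_alt k m score
instance (k : Int) (m : Int) (score : List Int) (out : Int) : Decidable (Spec_solution k m score out) := by unfold Spec_solution; infer_instance

-- ===== CLAIM (what is proved, stated in full; the proofs are below) =====
def Claim_equal_solution : Prop := ∀ (k : Int) (m : Int) (score : List Int), Dom_solution k m score → Spec_solution k m score (solution k m score)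

-- ===== LEMMAS AND PROOFS =====

-- sum of the elements A's loop picks: countdown c to the next pick, then reset to mm
def pickD (mm : Nat) : List Int → Nat → Int
  | [], _ => 0
  | x :: t, c => if c = 1 then x + pickD mm t mm else pickD mm t (c - 1)

theorem loop_neg (m : Int) (hm : m ≤ 0) (d : List Int) :
    ∀ (ans box : Int), 0 ≤ box →
    ((d.foldl (fun (st : Int × Int) s =>
        let box := st.2 + 1
        if box = m then (st.1 + s * m, 0) else (st.1, box)) (ans, box)).1) = ans := by
  induction d with
  | nil => intro ans box _; rfl
  | cons x t ih =>
      intro ans box hbox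
      have hne : ¬ (box + 1 = m) := by omega
      simp only [List.foldl_cons, if_neg hne]
      exact ih ans (box + 1) (by omega)

theorem loop_eq (m : Int) (hm : 0 < m) (d : List Int) :
    ∀ (ans box : Int), 0 ≤ box → box < m →
    ((d.foldl (fun (st : Int × Int) s =>
        let box := st.2 + 1
        if box = m then (st.1 + s * m, 0) else (st.1, box)) (ans, box)).1)
      = ans + m * pickD m.toNat d (m.toNat - box.toNat) := by
  induction d with
  | nil => intro ans box _ _; simp [pickD]
  | cons x t ih =>
      intro ans box h0 h1
      by_cases h : box + 1 = m
      · have hc : m.toNat - box.toNat = 1 := by omega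
        simp only [List.foldl_cons, if_pos h, hc, pickD]
        rw [ih (ans + x * m) 0 le_rfl hm]
        simp only [Int.toNat_zero, Nat.sub_zero, if_true]
        ring
      · have hc1 : m.toNat - box.toNat ≠ 1 := by omega
        simp only [List.foldl_cons, if_neg h, pickD, if_neg hc1]
        rw [ih ans (box + 1) (by omega) (by omega)]
        have harg : m.toNat - (box + 1).toNat = m.toNat - box.toNat - 1 := by omega
        rw [harg]

theorem pickD_short (mm : Nat) : ∀ (t : List Int) (c : Nat), t.length < c → pickD mm t c = 0 := by
  intro t
  induction t with
  | nil => intro c _; rfl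
  | cons x t ih =>
      intro c hc
      have h1 : c ≠ 1 := by simp at hc; omega
      simp only [pickD, if_neg h1]
      exact ih (c - 1) (by simp at hc ⊢; omega)

theorem pickD_chunk (mm : Nat) : ∀ (u v : List Int) (c : Nat), u.length = c → 1 ≤ c →
    pickD mm (u ++ v) c = u.getD (c - 1) 0 + pickD mm v mm := by
  intro u
  induction u with
  | nil =>
      intro v c h h1
      exfalso; simp at h; omega
  | cons x u ih =>
      intro v c h h1
      by_cases hc : c = 1
      · subst hc
        have hu : u = [] := by simpa using h
        subst hu
        simp [pickD]
      · have hlen : u.length = c - 1 := by simp at h; omega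
        simp only [List.cons_append, pickD, if_neg hc]
        rw [ih v (c - 1) hlen (by omega)]
        have h3 : c - 1 - 1 = c - 2 := by omega
        have h2 : c - 1 = (c - 2) + 1 := by omega
        rw [h3, h2, List.getD_cons_succ]

theorem pickD_sum (mm : Nat) (hm : 1 ≤ mm) : ∀ (n : Nat) (d : List Int), d.length = n →
    pickD mm d mm = ∑ j ∈ Finset.range (d.length / mm), d.getD ((j + 1) * mm - 1) 0 := by
  intro n
  induction n using Nat.strong_induction_on with
  | _ n ih =>
      intro d hd
      subst hd
      by_cases h : d.length < mm
      · rw [pickD_short mm d mm h, Nat.div_eq_of_lt h]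
        simp
      · have h' : mm ≤ d.length := by omega
        have hsplit : d = d.take mm ++ d.drop mm := (List.take_append_drop mm d).symm
        have hulen : (d.take mm).length = mm := by simp [List.length_take]; omega
        have hd2 : (d.drop mm).length = d.length - mm := by simp
        have h1 : pickD mm d mm = (d.take mm).getD (mm - 1) 0 + pickD mm (d.drop mm) mm := by
          conv_lhs => rw [hsplit]
          exact pickD_chunk mm _ _ mm hulen hm
        have h2 := ih (d.drop mm).length (by rw [hd2]; omega) (d.drop mm) rfl
        have hq : d.length / mm = (d.drop mm).length / mm + 1 := by
          rw [hd2, ← Nat.div_eq_sub_div (by omega) h']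
        rw [h1, h2, hq, Finset.sum_range_succ', add_comm]
        congr 1
        · apply Finset.sum_congr rfl
          intro j _
          rw [List.getD_eq_getElem?_getD, List.getD_eq_getElem?_getD, List.getElem?_drop]
          have hA : 0 < (j + 1) * mm := Nat.mul_pos (by omega) (by omega)
          have he : mm + ((j + 1) * mm - 1) = (j + 1 + 1) * mm - 1 := by
            rw [show (j + 1 + 1) * mm = (j + 1) * mm + mm from by rw [Nat.succ_mul]]
            omega
          rw [he]
        · rw [List.getD_eq_getElem?_getD, List.getD_eq_getElem?_getD, List.getElem?_take,
            if_pos (by omega : mm - 1 < mm)]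
          congr 2
          omega

theorem sorted_desc_eq_reverse (xs : List Int) :
    PySem.List.sorted xs (fun x => x) true = (PySem.List.sorted xs (fun x => x) false).reverse := by
  apply PySem.List.eq_of_perm_of_pairwise_le_of_injective (key := fun x : Int => -x) neg_injective
  · exact (PySem.List.sorted_perm xs _ true).trans
      ((PySem.List.sorted_perm xs _ false).symm.trans (List.reverse_perm _).symm)
  · exact (PySem.List.sorted_pairwise_rev xs _).imp (by intro a b h; simpa using h)
  · rw [List.pairwise_reverse]
    exact (PySem.List.sorted_pairwise xs _).imp (by intro a b h; simpa using h)

theorem sum_map_range (n : Nat) (f : Nat → Int) : ((List.range n).map f).sum = ∑ j ∈ Finset.range n, f j := rfl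

theorem bsum (M : Nat) (hM : 1 ≤ M) (a : List Int) :
    ((PySem.List.pyRange (PySem.Int.mod (PySem.List.len a) ((M : Nat) : Int)) (PySem.List.len a) ((M : Nat) : Int)).foldl
      (fun acc i => acc + PySem.List.pyGetD a i 0) 0)
    = ∑ j ∈ Finset.range (a.length / M), a.getD (a.length % M + j * M) 0 := by
  have hlen : PySem.List.len a = ((a.length : Nat) : Int) := by simp [PySem.List.len]
  rw [hlen, PySem.Int.mod_natCast]
  have hMpos : (0 : Int) < (M : Int) := by exact_mod_cast hM
  rw [PySem.List.pyRange_of_pos _ _ hMpos, PySem.List.foldl_add, List.map_map, sum_map_range, zero_add]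
  set N := a.length with hNdef
  set q := N / M with hqdef
  set r := N % M with hrdef
  have hcount : (if ((r : Nat) : Int) < ((N : Nat) : Int) then ((((N : Nat) : Int) - ((r : Nat) : Int) + ((M : Nat) : Int) - 1) / ((M : Nat) : Int)).toNat else 0) = q := by
    by_cases hrN : ((r : Nat) : Int) < ((N : Nat) : Int)
    · rw [if_pos hrN]
      have hNr : N = M * q + r := (Nat.div_add_mod N M).symm
      have e : (((N : Nat) : Int) - ((r : Nat) : Int) + ((M : Nat) : Int) - 1) = (((M * q + (M - 1) : Nat)) : Int) := by
        have h2 : (((M * q + (M - 1) : Nat)) : Int) = ((M * q : Nat) : Int) + (((M : Nat) : Int) - 1) := by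
          push_cast [hM]; ring
        have h3 : ((N : Nat) : Int) = ((M * q : Nat) : Int) + ((r : Nat) : Int) := by exact_mod_cast hNr
        rw [h2, h3]; ring
      rw [e, Int.ofNat_ediv_ofNat, Int.toNat_natCast]
      rw [Nat.add_comm, Nat.add_mul_div_left _ _ (show 0 < M by omega), Nat.div_eq_of_lt (by omega), Nat.zero_add]
    · rw [if_neg hrN]
      have hrn : r = N := le_antisymm (Nat.mod_le N M) (by exact_mod_cast not_lt.mp hrN)
      rcases Nat.lt_or_ge N M with hlt | hge
      · exact (Nat.div_eq_of_lt hlt).symm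
      · exfalso
        have := Nat.mod_lt N (show 0 < M by omega)
        omega
  rw [hcount]
  apply Finset.sum_congr rfl
  intro j _
  simp only [Function.comp_apply]
  rw [PySem.List.pyGetD_of_nonneg _ _ (by positivity)]
  rw [show (((r : Nat) : Int) + ((M : Nat) : Int) * ((j : Nat) : Int)) = ((r + j * M : Nat) : Int) by push_cast; ring,
    Int.toNat_natCast]

-- ===== VERDICT (by name: the statement is the Claim_ definition above) =====
theorem solution_spec : Claim_equal_solution := by
  intro k m score _
  show solution k m score = solution_alt k m score
  unfold solution solution_alt
  by_cases hm : m ≤ 0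
  · rw [if_pos hm]
    exact loop_neg m hm _ 0 0 le_rfl
  · have hm' : (0 : Int) < m := by omega
    rw [if_neg hm]
    set a := PySem.List.sorted score (fun x => x) false with ha
    show ((PySem.List.sorted score (fun x => x) true).foldl
      (fun (st : Int × Int) s =>
        let box := st.2 + 1
        if box = m then (st.1 + s * m, 0) else (st.1, box)) (0, 0)).1
      = m * ((PySem.List.pyRange (PySem.Int.mod (PySem.List.len a) m) (PySem.List.len a) m).foldl
          (fun acc i => acc + PySem.List.pyGetD a i 0) 0)
    rw [sorted_desc_eq_reverse score, ← ha]
    rw [loop_eq m hm' _ 0 0 le_rfl hm']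
    have hMm : ((m.toNat : Nat) : Int) = m := Int.toNat_of_nonneg (le_of_lt hm')
    set M := m.toNat with hMdef
    have hM1 : 1 ≤ M := by omega
    rw [show (0 : Int).toNat = 0 from rfl, Nat.sub_zero]
    rw [pickD_sum M hM1 a.reverse.length a.reverse rfl]
    rw [← hMm, bsum M hM1 a, zero_add]
    congr 1
    rw [List.length_reverse]
    set N := a.length with hNdef
    set q := N / M with hqdef
    set r := N % M with hrdef
    rw [← Finset.sum_range_reflect (fun j => a.getD (r + j * M) 0) q]
    apply Finset.sum_congr rfl
    intro j hj
    simp only [Finset.mem_range] at hj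
    have hNr : N = q * M + r := by rw [Nat.mul_comm q M]; exact (Nat.div_add_mod N M).symm
    have hjq : j * M + M ≤ q * M := by
      have h1 : (j + 1) * M ≤ q * M := Nat.mul_le_mul_right M (by omega)
      calc j * M + M = (j + 1) * M := by rw [Nat.succ_mul]
        _ ≤ q * M := h1
    have hsm : (j + 1) * M = j * M + M := Nat.succ_mul j M
    have hidx : (j + 1) * M - 1 < N := by
      rw [hsm]
      generalize hB : q * M = B at hNr hjq
      generalize hA : j * M = A at hjq
      omega
    rw [List.getD_reverse _ hidx]
    have hrm : (q - 1 - j) * M = q * M - M - j * M := by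
      rw [Nat.sub_mul, Nat.sub_mul, Nat.one_mul]
    have hie : N - 1 - ((j + 1) * M - 1) = r + (q - 1 - j) * M := by
      rw [hsm, hrm]
      generalize hB : q * M = B at hNr hjq
      generalize hA : j * M = A at hNr hjq ⊢
      omega
    rw [hie]
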